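-- pv_equiv track=rewrite | github.com/TheSerpentMaster/usaco-1 | 2025/Classwork/NonTransitiveDice(dad).py | find
-- ===== SOURCE A (Python) =====
-- def win(a, b):
--     score1 = 0
--     score2 = 0
--
--     for num1 in a:
--         for num2 in b:
--             if num1 > num2:
--                 score1 += 1
--             elif num1 < num2:
--                 score2 += 1
--
--     if score1 > score2:
--         return 1
--     if score1 < score2:
--         return -1
--     return 0
--
-- def find(a, b):
--     for x in range(1, 11):
--         for y in range(1, 11):
--             for z in range(1, 11):
--                 for k in range(1, 11):
--                     dice = (x, y, z, k)
--                     if win(dice, a) == 1 and win(b, dice) == 1: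
--                         return True
--     return False
-- ===== SOURCE B (Python) =====
-- def find(a, b):
--     pa = [sum((v > t) - (v < t) for t in a) for v in range(1, 11)]
--     pb = [sum((t > v) - (t < v) for t in b) for v in range(1, 11)]
--     pq = list(zip(pa, pb))
--     return any(px + py + pz + pk > 0 and qx + qy + qz + qk > 0
--                for (px, qx) in pq for (py, qy) in pq
--                for (pz, qz) in pq for (pk, qk) in pq)
-- ===== Notes on version B (the rewrite author's own statement) =====
-- stated objective: faster
-- what changed: B precomputes for each face value v in 1..10 the net comparison score of v against a and of b against v (10 table entries per side, one pass over each list), then tests all candidate dice by adding four table entries, instead of rescanning a and b for every one of the 10^4 candidate dice.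
import Mathlib
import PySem

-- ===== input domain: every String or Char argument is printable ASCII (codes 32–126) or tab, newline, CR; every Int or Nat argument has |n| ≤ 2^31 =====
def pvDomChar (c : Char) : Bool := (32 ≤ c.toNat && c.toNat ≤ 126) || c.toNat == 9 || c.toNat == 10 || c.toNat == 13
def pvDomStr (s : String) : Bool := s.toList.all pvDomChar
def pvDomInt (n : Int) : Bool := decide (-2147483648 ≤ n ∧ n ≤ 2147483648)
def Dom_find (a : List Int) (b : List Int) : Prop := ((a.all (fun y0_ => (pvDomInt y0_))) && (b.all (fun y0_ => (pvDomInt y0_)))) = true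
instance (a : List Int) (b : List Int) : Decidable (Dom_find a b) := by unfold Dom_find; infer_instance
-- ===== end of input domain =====

-- B replaces A's rescans of a and b for each of the 10^4 candidate dice by per-value
-- score tables built in one pass over each list (objective: faster).

-- ===== PORT A =====
def win (a : List Int) (b : List Int) : Int :=
  let s := a.foldl (fun (s : Int × Int) num1 =>
    b.foldl (fun (s : Int × Int) num2 =>
      if num1 > num2 then (s.1 + 1, s.2)
      else if num1 < num2 then (s.1, s.2 + 1)
      else s) s) ((0 : Int), (0 : Int))
  if s.1 > s.2 then 1 else if s.1 < s.2 then -1 else 0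

def find (a : List Int) (b : List Int) : Bool :=
  (PySem.List.pyRange 1 11 1).any fun x =>
  (PySem.List.pyRange 1 11 1).any fun y =>
  (PySem.List.pyRange 1 11 1).any fun z =>
  (PySem.List.pyRange 1 11 1).any fun k =>
    win [x, y, z, k] a == 1 && win b [x, y, z, k] == 1

-- ===== PORT B =====
def find_alt (a : List Int) (b : List Int) : Bool :=
  let pa := (PySem.List.pyRange 1 11 1).map fun v =>
    a.foldl (fun s t => s + ((if v > t then (1 : Int) else 0) - (if v < t then 1 else 0))) 0
  let pb := (PySem.List.pyRange 1 11 1).map fun v =>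
    b.foldl (fun s t => s + ((if t > v then (1 : Int) else 0) - (if t < v then 1 else 0))) 0
  let pq := pa.zip pb
  pq.any fun pxq => pq.any fun pyq => pq.any fun pzq => pq.any fun pkq =>
    pxq.1 + pyq.1 + pzq.1 + pkq.1 > 0 && pxq.2 + pyq.2 + pzq.2 + pkq.2 > 0

-- ===== PRECONDITION & SPEC =====
def Spec_find (a : List Int) (b : List Int) (out : Bool) : Prop := out = find_alt a b
instance (a : List Int) (b : List Int) (out : Bool) : Decidable (Spec_find a b out) := by unfold Spec_find; infer_instance

-- ===== CLAIM (what is proved, stated in full; the proofs are below) =====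
def Claim_equal_find : Prop := ∀ (a : List Int) (b : List Int), Dom_find a b → Spec_find a b (find a b)

-- ===== LEMMAS AND PROOFS =====

/-- B's table entry for side `a` (proof-local abbreviation for the fold in `find_alt`). -/
def fA (a : List Int) (v : Int) : Int :=
  a.foldl (fun s t => s + ((if v > t then (1 : Int) else 0) - (if v < t then 1 else 0))) 0

/-- B's table entry for side `b`. -/
def fB (b : List Int) (v : Int) : Int :=
  b.foldl (fun s t => s + ((if t > v then (1 : Int) else 0) - (if t < v then 1 else 0))) 0

lemma sum_map_sub (f g : Int -> Int) (l : List Int) :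
    (l.map (fun t => f t - g t)).sum = (l.map f).sum - (l.map g).sum := by
  induction l with
  | nil => simp
  | cons h tl ih => simp only [List.map_cons, List.sum_cons, ih]; ring

/-- win's inner loop over `b` adds the number of elements beaten / exceeding. -/
lemma win_inner (num1 : Int) (b : List Int) (s : Int × Int) :
    b.foldl (fun (s : Int × Int) num2 =>
      if num1 > num2 then (s.1 + 1, s.2)
      else if num1 < num2 then (s.1, s.2 + 1)
      else s) s
    = (s.1 + (b.map (fun t => if num1 > t then (1 : Int) else 0)).sum,
       s.2 + (b.map (fun t => if num1 < t then (1 : Int) else 0)).sum) := by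
  induction b generalizing s with
  | nil => simp
  | cons h tl ih =>
    simp only [List.foldl_cons, List.map_cons, List.sum_cons, ih]
    split_ifs <;> simp [Prod.ext_iff] <;> omega

/-- a pair-accumulating fold that adds `f`/`g` componentwise. -/
lemma foldl_pair_add (f g : Int -> Int) (l : List Int) (s : Int × Int) :
    l.foldl (fun (s : Int × Int) t => (s.1 + f t, s.2 + g t)) s
      = (s.1 + (l.map f).sum, s.2 + (l.map g).sum) := by
  induction l generalizing s with
  | nil => simp
  | cons h tl ih => simp [ih, add_assoc]

/-- characterisation of `win` by double sums. -/
lemma win_eq (a b : List Int) :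
    win a b =
      (if (a.map (fun u => (b.map (fun t => if u > t then (1 : Int) else 0)).sum)).sum
          > (a.map (fun u => (b.map (fun t => if u < t then (1 : Int) else 0)).sum)).sum then 1
       else if (a.map (fun u => (b.map (fun t => if u > t then (1 : Int) else 0)).sum)).sum
          < (a.map (fun u => (b.map (fun t => if u < t then (1 : Int) else 0)).sum)).sum then -1
       else 0) := by
  unfold win
  have hf : (fun (s : Int × Int) num1 =>
      b.foldl (fun (s : Int × Int) num2 =>
        if num1 > num2 then (s.1 + 1, s.2)
        else if num1 < num2 then (s.1, s.2 + 1)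
        else s) s)
      = fun (s : Int × Int) u =>
        (s.1 + (b.map (fun t => if u > t then (1 : Int) else 0)).sum,
         s.2 + (b.map (fun t => if u < t then (1 : Int) else 0)).sum) := by
    funext s u; exact win_inner u b s
  rw [hf, foldl_pair_add]
  simp

lemma fA_eq (a : List Int) (v : Int) :
    fA a v = (a.map (fun t => if v > t then (1 : Int) else 0)).sum
             - (a.map (fun t => if v < t then (1 : Int) else 0)).sum := by
  unfold fA
  rw [PySem.List.foldl_add,
      sum_map_sub (fun t => if v > t then (1 : Int) else 0) (fun t => if v < t then 1 else 0)]
  ring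

lemma fB_eq (b : List Int) (v : Int) :
    fB b v = (b.map (fun t => if t > v then (1 : Int) else 0)).sum
             - (b.map (fun t => if t < v then (1 : Int) else 0)).sum := by
  unfold fB
  rw [PySem.List.foldl_add,
      sum_map_sub (fun t => if t > v then (1 : Int) else 0) (fun t => if t < v then 1 else 0)]
  ring

/-- pointwise: A's candidate test equals B's table test. -/
lemma cond_eq (a b : List Int) (x y z k : Int) :
    (win [x, y, z, k] a == 1 && win b [x, y, z, k] == 1)
      = (decide (fA a x + fA a y + fA a z + fA a k > 0)
          && decide (fB b x + fB b y + fB b z + fB b k > 0)) := by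
  rw [win_eq [x, y, z, k] a, win_eq b [x, y, z, k]]
  simp only [fA_eq, fB_eq, List.map_cons, List.map_nil, List.sum_cons, List.sum_nil,
    PySem.List.sum_map_add_int, gt_iff_lt]
  congr 1
  · split_ifs with h1 h2 <;> simp <;> omega
  · split_ifs with h1 h2 <;> simp <;> omega

-- ===== VERDICT (by name: the statement is the Claim_ definition above) =====
theorem find_spec : Claim_equal_find := by
  intro a b _
  unfold Spec_find find find_alt
  simp only [List.zip_map', List.any_map, Function.comp_def]
  simp only [cond_eq a b]
  simp only [fA, fB]
  rfl
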